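-- pv_equiv track=rewrite | github.com/mazarady/Advanced-Python-Programming | Generators/q4solution.py | min_key_order
-- ===== SOURCE A (Python) =====
-- def min_key_order(adict):
--     history_of_yields = list()
--     alist = [(k,v) for k, v in adict.items()]
--
--     while len(alist) != 0:
--
--         alist = [(k,v) for k, v in adict.items() if (k,v) not in history_of_yields]
--
--         try:
--             min_value = min(alist)
--             history_of_yields.append(min_value)
--             alist.remove(min_value)
--
--             if max(history_of_yields) <= min_value:
--                 yield min_value
--
--         except:
--             pass
-- ===== SOURCE B (Python) =====
-- def min_key_order(adict):
--     yield from sorted(adict.items())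
-- ===== Notes on version B (the rewrite author's own statement) =====
-- stated objective: idiomatic
-- what changed: Replaces A's repeated rebuild-filter-and-linear-min-scan selection loop (with a yield history list) by a single builtin sort of the dict's items, emitted in order.
import Mathlib
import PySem

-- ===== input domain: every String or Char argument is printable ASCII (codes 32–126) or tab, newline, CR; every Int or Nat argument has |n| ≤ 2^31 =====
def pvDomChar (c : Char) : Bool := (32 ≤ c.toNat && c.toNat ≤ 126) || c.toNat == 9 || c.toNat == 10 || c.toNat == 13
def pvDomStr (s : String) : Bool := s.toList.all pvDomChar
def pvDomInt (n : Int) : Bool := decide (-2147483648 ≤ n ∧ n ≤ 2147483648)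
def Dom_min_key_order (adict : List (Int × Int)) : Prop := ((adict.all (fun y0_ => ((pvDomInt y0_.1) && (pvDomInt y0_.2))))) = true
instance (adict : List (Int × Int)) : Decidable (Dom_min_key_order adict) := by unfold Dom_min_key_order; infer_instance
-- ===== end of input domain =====

-- B replaces A's repeated filter-and-min selection loop with a single builtin sort of the dict items (idiomatic, asymptotically faster).
-- Both A and B are generators; the equivalence is about the yielded sequence (list(...)); neither mutates its argument.

-- ===== PORT A =====
-- Python tuple '<=' on (Int, Int)
def pyLePair (a b : Int × Int) : Bool := a.1 < b.1 || (a.1 == b.1 && a.2 ≤ b.2)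

-- the 'while len(alist) != 0' loop: state = (history_of_yields, alist, yielded-so-far); fuel bounds the iterations
def minKeyLoop (items : List (Int × Int)) : Nat → List (Int × Int) → List (Int × Int) → List (Int × Int) → List (Int × Int)
  | 0, _, _, out => out
  | fuel+1, history, alist, out =>
    if alist.isEmpty then out else
      -- alist = [(k,v) for k, v in adict.items() if (k,v) not in history_of_yields]
      let alist2 := items.filter (fun p => !(history.contains p))
      match PySem.List.min2? alist2 (fun p => p.1) (fun p => p.2) with   -- min(alist): tuple order
      | none => minKeyLoop items fuel history alist2 out                 -- ValueError on empty, swallowed by 'except: pass'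
      | some m =>
        let history2 := history ++ [m]                                   -- history_of_yields.append(min_value)
        match PySem.List.remove? alist2 m with                           -- alist.remove(min_value)
        | none => minKeyLoop items fuel history2 alist2 out              -- unreachable (m ∈ alist2); 'except: pass'
        | some alist3 =>
          match PySem.List.max2? history2 (fun p => p.1) (fun p => p.2) with  -- max(history_of_yields): tuple order
          | none => minKeyLoop items fuel history2 alist3 out            -- unreachable (history2 ≠ []); 'except: pass'
          | some mx =>
            minKeyLoop items fuel history2 alist3 (if pyLePair mx m then out ++ [m] else out)

def min_key_order (adict : List (Int × Int)) : List (Int × Int) :=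
  let items := (PySem.Dict.ofList adict).items
  minKeyLoop items (items.length + 1) [] items []

-- ===== PORT B =====
def min_key_order_alt (adict : List (Int × Int)) : List (Int × Int) :=
  PySem.List.sorted2 (PySem.Dict.ofList adict).items (fun p => p.1) (fun p => p.2)

-- ===== PRECONDITION & SPEC =====
def Spec_min_key_order (adict : List (Int × Int)) (out : List (Int × Int)) : Prop := out = min_key_order_alt adict
instance (adict : List (Int × Int)) (out : List (Int × Int)) : Decidable (Spec_min_key_order adict out) := by unfold Spec_min_key_order; infer_instance

-- ===== CLAIM (what is proved, stated in full; the proofs are below) =====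
def Claim_equal_min_key_order : Prop := ∀ (adict : List (Int × Int)), Dom_min_key_order adict → Spec_min_key_order adict (min_key_order adict)

-- ===== LEMMAS AND PROOFS =====

-- the Boolean tuple-'<' test used by min2?/max2?/sorted2 is the strict lexicographic order
lemma ltb_eq (a b : Int × Int) :
    (decide (a.1 < b.1) || (!decide (b.1 < a.1) && decide (a.2 < b.2))) = decide (toLex a < toLex b) := by
  rcases a with ⟨a1, a2⟩; rcases b with ⟨b1, b2⟩
  by_cases h1 : a1 < b1 <;> by_cases h2 : b1 < a1 <;> by_cases h3 : a2 < b2 <;>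
    simp [Prod.Lex.toLex_lt_toLex, h1, h2, h3] <;> omega

lemma pyLePair_iff (a b : Int × Int) : pyLePair a b = true ↔ toLex a ≤ toLex b := by
  rcases a with ⟨a1, a2⟩; rcases b with ⟨b1, b2⟩
  simp [pyLePair, Prod.Lex.toLex_le_toLex]

-- sorted2 with keys (fst, snd) is sorting by the lexicographic key
lemma sorted2_eq (xs : List (Int × Int)) :
    PySem.List.sorted2 xs (fun p => p.1) (fun p => p.2) = PySem.List.sorted xs (fun p => toLex p) := by
  simp only [PySem.List.sorted2, PySem.List.sorted]
  congr 1
  funext acc x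
  congr 1
  funext a b
  exact ltb_eq a b

-- the fold step of min2? (resp. max2?) with keys (fst, snd), named so the induction is stable
def minStep (acc : Option (Int × Int)) (x : Int × Int) : Option (Int × Int) :=
  match acc with
  | none => some x
  | some m => if (decide (x.1 < m.1) || (!decide (m.1 < x.1) && decide (x.2 < m.2))) = true then some x else some m

def maxStep (acc : Option (Int × Int)) (x : Int × Int) : Option (Int × Int) :=
  match acc with
  | none => some x
  | some m => if (decide (m.1 < x.1) || (!decide (x.1 < m.1) && decide (m.2 < x.2))) = true then some x else some m

lemma min2?_eq_fold (xs : List (Int × Int)) :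
    PySem.List.min2? xs (fun p => p.1) (fun p => p.2) = xs.foldl minStep none := by
  simp only [PySem.List.min2?]
  congr 1
  funext acc x
  cases acc <;> rfl

lemma max2?_eq_fold (xs : List (Int × Int)) :
    PySem.List.max2? xs (fun p => p.1) (fun p => p.2) = xs.foldl maxStep none := by
  simp only [PySem.List.max2?]
  congr 1
  funext acc x
  cases acc <;> rfl

lemma minStep_some (a x : Int × Int) :
    minStep (some a) x = if toLex x < toLex a then some x else some a := by
  show (if (decide (x.1 < a.1) || (!decide (a.1 < x.1) && decide (x.2 < a.2))) = true then some x else some a) = _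
  rw [ltb_eq]
  simp

lemma min_fold_spec (t : List (Int × Int)) : ∀ a : Int × Int,
    ∃ m, t.foldl minStep (some a) = some m ∧ m ∈ a :: t ∧ ∀ x ∈ a :: t, toLex m ≤ toLex x := by
  induction t with
  | nil =>
    intro a
    refine ⟨a, rfl, List.mem_cons_self, ?_⟩
    intro x hx
    rcases List.mem_cons.mp hx with h | h
    · subst h; exact le_refl _
    · simp at h
  | cons y t ih =>
    intro a
    rw [List.foldl_cons, minStep_some]
    by_cases h : toLex y < toLex a
    · rw [if_pos h]
      obtain ⟨m, hm, hmem, hmin⟩ := ih y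
      refine ⟨m, hm, ?_, ?_⟩
      · rcases List.mem_cons.mp hmem with h' | h' <;> simp [h']
      · intro x hx
        rcases List.mem_cons.mp hx with h' | h'
        · subst h'; exact le_trans (hmin y List.mem_cons_self) h.le
        · exact hmin x h'
    · rw [if_neg h]
      obtain ⟨m, hm, hmem, hmin⟩ := ih a
      refine ⟨m, hm, ?_, ?_⟩
      · rcases List.mem_cons.mp hmem with h' | h' <;> simp [h']
      · intro x hx
        rcases List.mem_cons.mp hx with h' | h'
        · rw [h']; exact hmin a List.mem_cons_self
        · rcases List.mem_cons.mp h' with h'' | h''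
          · rw [h'']; exact le_trans (hmin a List.mem_cons_self) (not_lt.mp h)
          · exact hmin x (List.mem_cons.mpr (Or.inr h''))

lemma min2?_spec (xs : List (Int × Int)) (hne : xs ≠ []) :
    ∃ m, PySem.List.min2? xs (fun p => p.1) (fun p => p.2) = some m ∧ m ∈ xs ∧
      ∀ x ∈ xs, toLex m ≤ toLex x := by
  match xs, hne with
  | y :: t, _ =>
    obtain ⟨m, hm, hmem, hmin⟩ := min_fold_spec t y
    exact ⟨m, by rw [min2?_eq_fold, List.foldl_cons]; exact hm, hmem, hmin⟩

lemma max_fold_mem (t : List (Int × Int)) : ∀ a : Int × Int,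
    ∃ m, t.foldl maxStep (some a) = some m ∧ m ∈ a :: t := by
  induction t with
  | nil => intro a; exact ⟨a, rfl, List.mem_cons_self⟩
  | cons y t ih =>
    intro a
    rw [List.foldl_cons]
    have hstep : maxStep (some a) y = some y ∨ maxStep (some a) y = some a := by
      by_cases h : (decide (a.1 < y.1) || (!decide (y.1 < a.1) && decide (a.2 < y.2))) = true
      · left; simp [maxStep, h]
      · right; simp [maxStep, h]
    rcases hstep with h | h <;> rw [h]
    · obtain ⟨m, hm, hmem⟩ := ih y
      refine ⟨m, hm, ?_⟩
      rcases List.mem_cons.mp hmem with h' | h' <;> simp [h']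
    · obtain ⟨m, hm, hmem⟩ := ih a
      refine ⟨m, hm, ?_⟩
      rcases List.mem_cons.mp hmem with h' | h' <;> simp [h']

lemma max2?_mem (xs : List (Int × Int)) (hne : xs ≠ []) :
    ∃ m, PySem.List.max2? xs (fun p => p.1) (fun p => p.2) = some m ∧ m ∈ xs := by
  match xs, hne with
  | y :: t, _ =>
    obtain ⟨m, hm, hmem⟩ := max_fold_mem t y
    exact ⟨m, by rw [max2?_eq_fold, List.foldl_cons]; exact hm, hmem⟩

lemma remove?_eq_erase (xs : List (Int × Int)) (m : Int × Int) (h : m ∈ xs) :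
    PySem.List.remove? xs m = some (xs.erase m) := by
  induction xs with
  | nil => simp at h
  | cons x t ih =>
    by_cases hx : x = m
    · subst hx
      simp [PySem.List.remove?, List.idxOf?_cons, List.erase_cons_head]
    · have hmt : m ∈ t := by
        rcases List.mem_cons.mp h with h' | h'
        · exact absurd h'.symm hx
        · exact h'
      obtain ⟨k, hk, hek⟩ : ∃ k, List.idxOf? m t = some k ∧ t.eraseIdx k = t.erase m := by
        have := ih hmt
        simp only [PySem.List.remove?, Option.map_eq_some_iff] at this
        obtain ⟨k, hk, hek⟩ := this
        exact ⟨k, hk, hek⟩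
      have hbe : (x == m) = false := by simp [hx]
      simp [PySem.List.remove?, List.idxOf?_cons, hbe, hk, List.eraseIdx_cons_succ, hek,
        List.erase_cons_tail]

lemma sorted_cons_min (alist : List (Int × Int)) (m : Int × Int) (hnd : alist.Nodup)
    (hmem : m ∈ alist) (hmin : ∀ x ∈ alist, toLex m ≤ toLex x) :
    PySem.List.sorted alist (fun p => toLex p) = m :: PySem.List.sorted (alist.erase m) (fun p => toLex p) := by
  have hperm : (m :: PySem.List.sorted (alist.erase m) (fun p => toLex p)).Perm alist := by
    refine List.Perm.trans (List.Perm.cons m (PySem.List.sorted_perm _ _ _)) ?_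
    exact (List.perm_cons_erase hmem).symm
  refine PySem.List.sorted_eq_of_perm_of_pairwise_lt _ _ _ hperm ?_
  have hndE : (alist.erase m).Nodup := hnd.erase m
  have hndS : (PySem.List.sorted (alist.erase m) (fun p => toLex p)).Nodup :=
    (PySem.List.sorted_perm (alist.erase m) (fun p => toLex p) false).nodup_iff.mpr hndE
  have hle := PySem.List.sorted_pairwise (alist.erase m) (fun p => toLex p)
  constructor
  · intro x hx
    have hx' : x ∈ alist.erase m := (PySem.List.sorted_perm _ _ _).mem_iff.mp hx
    have hxm : x ≠ m ∧ x ∈ alist := (List.Nodup.mem_erase_iff hnd).mp hx'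
    exact lt_of_le_of_ne (hmin x hxm.2) (fun he => hxm.1 (toLex_inj.mp he).symm)
  · exact (hle.and hndS).imp (fun {a b} hab => lt_of_le_of_ne hab.1 (fun he => hab.2 (toLex_inj.mp he)))

lemma loop_eq (items : List (Int × Int)) (hnd : items.Nodup) :
    ∀ (fuel : Nat) (history alist out : List (Int × Int)),
      alist = items.filter (fun p => !(history.contains p)) →
      alist.length < fuel →
      (∀ h ∈ history, ∀ x ∈ alist, toLex h < toLex x) →
      minKeyLoop items fuel history alist out = out ++ PySem.List.sorted alist (fun p => toLex p) := by
  intro fuel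
  induction fuel with
  | zero => intro _ _ _ _ hlt; omega
  | succ fuel ih =>
    intro history alist out hfil hlen hinv
    by_cases hae : alist = []
    · subst hae
      simp [minKeyLoop, PySem.List.sorted]
    · have hne : alist.isEmpty = false := by
        cases alist with
        | nil => exact absurd rfl hae
        | cons _ _ => rfl
      have halist2 : items.filter (fun p => !(history.contains p)) = alist := hfil.symm
      obtain ⟨m, hm, hmem, hmin⟩ := min2?_spec alist hae
      have hndA : alist.Nodup := hfil ▸ (hnd.filter _)
      have hrem : PySem.List.remove? alist m = some (alist.erase m) := remove?_eq_erase alist m hmem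
      obtain ⟨mx, hmx, hmxmem⟩ := max2?_mem (history ++ [m]) (by simp)
      have hcond : pyLePair mx m = true := by
        rw [pyLePair_iff]
        rcases List.mem_append.mp hmxmem with h' | h'
        · exact le_of_lt (hinv mx h' m hmem)
        · simp at h'; subst h'; exact le_refl _
      have hstep : minKeyLoop items (fuel + 1) history alist out =
          minKeyLoop items fuel (history ++ [m]) (alist.erase m) (out ++ [m]) := by
        rw [minKeyLoop]
        simp only [hne, Bool.false_eq_true, if_false, halist2, hm, hrem, hmx, hcond, if_true]
      have hfil' : alist.erase m = items.filter (fun p => !((history ++ [m]).contains p)) := by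
        rw [List.Nodup.erase_eq_filter hndA, hfil, List.filter_filter]
        apply List.filter_congr
        intro x _
        by_cases h1 : x = m <;> by_cases h2 : x ∈ history <;>
          simp [List.contains_eq_mem, h1, h2, bne]
      have hlen' : (alist.erase m).length < fuel := by
        have := List.length_erase_of_mem hmem
        have hpos : 0 < alist.length := List.length_pos_of_ne_nil hae
        omega
      have hinv' : ∀ h ∈ history ++ [m], ∀ x ∈ alist.erase m, toLex h < toLex x := by
        intro h hh x hx
        have hx' : x ≠ m ∧ x ∈ alist := (List.Nodup.mem_erase_iff hndA).mp hx
        rcases List.mem_append.mp hh with h' | h'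
        · exact hinv h h' x hx'.2
        · simp at h'; subst h'
          exact lt_of_le_of_ne (hmin x hx'.2) (fun he => hx'.1 (toLex_inj.mp he).symm)
      rw [hstep, ih (history ++ [m]) (alist.erase m) (out ++ [m]) hfil' hlen' hinv',
          sorted_cons_min alist m hndA hmem hmin]
      simp

lemma items_nodup (adict : List (Int × Int)) : (PySem.Dict.ofList adict).items.Nodup := by
  have h := PySem.Dict.nodup_keys_ofList adict
  simp only [PySem.Dict.keys] at h
  exact List.Nodup.of_map _ h

-- ===== VERDICT (by name: the statement is the Claim_ definition above) =====
theorem min_key_order_spec : Claim_equal_min_key_order := by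
  intro adict _
  unfold Spec_min_key_order min_key_order min_key_order_alt
  rw [sorted2_eq]
  have hnd := items_nodup adict
  rw [loop_eq _ hnd ((PySem.Dict.ofList adict).items.length + 1) [] _ [] (by simp) (by omega) (by simp)]
  simp
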